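-- pv_equiv track=rewrite | github.com/IBM/ibmtechzone-assets | qcuklsxkol/qcuklsxkol.py | drop_subset_keys
-- ===== SOURCE A (Python) =====
-- def drop_subset_keys(dictionary):
--     """
--     Drops keys from the input dictionary if their values are subsets of values of other keys for the same working table.
--
--     Args:
--         dictionary (dict): The input dictionary containing keys and their associated values.
--
--     Returns:
--         dict: The modified dictionary after removing keys that are subsets of values of other keys.
--     """
--     keys_to_remove = []  # List to store keys to be removed
--     for key1 in dictionary:
--         for key2 in dictionary:
--             if key1 != key2:
--                 # Extract working table names from the keys
--                 working_table_name1 = list(dictionary[key1])[0]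
--                 working_table_name2 = list(dictionary[key2])[0]
--                 # Check if both keys belong to the same working table
--                 if working_table_name1 == working_table_name2:
--                     # Get column names associated with each key
--                     column_key1 = list(dictionary[key1][working_table_name1].keys())
--                     column_key2 = list(dictionary[key2][working_table_name2].keys())
--                     # Check if the columns of key1 are a subset of columns of key2
--                     if set(column_key1).issubset(set(column_key2)):
--                         keys_to_remove.append(key1)  # Add key1 to keys_to_remove
--                         break  # No need to check further if key1 is subset of key2
--     # Remove keys that are subsets of values of other keys
--     for key in keys_to_remove:
--         del dictionary[key]
--     return dictionary  # Return the modified dictionary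
-- ===== SOURCE B (Python) =====
-- def drop_subset_keys(dictionary):
--     """Same result as A via one grouping pass: bucket keys by working table,
--     compare column-sets only within a bucket, then delete the marked keys in place."""
--     if len(dictionary) < 2:
--         return dictionary
--     groups = {}
--     for key, value in dictionary.items():
--         table = next(iter(value))
--         cols = set(value[table])
--         groups.setdefault(table, []).append((key, cols))
--     doomed = []
--     for members in groups.values():
--         for key1, cols1 in members:
--             if any(key2 != key1 and cols1 <= cols2 for key2, cols2 in members):
--                 doomed.append(key1)
--     for key in doomed:
--         del dictionary[key]
--     return dictionary
-- ===== Notes on version B (the rewrite author's own statement) =====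
-- stated objective: faster
-- what changed: B replaces A's all-pairs scan over the whole dict (which recomputes the working-table name and both column lists for every pair) by one grouping pass that buckets each key by its working table with its column-set computed once, then compares column-sets only within a bucket and deletes the marked keys.
-- outside the precondition, e.g. on drop_subset_keys({'a': {}, 'b': {'t': {'c': 1}}}): A raises IndexError, B raises StopIteration
import Mathlib
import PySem

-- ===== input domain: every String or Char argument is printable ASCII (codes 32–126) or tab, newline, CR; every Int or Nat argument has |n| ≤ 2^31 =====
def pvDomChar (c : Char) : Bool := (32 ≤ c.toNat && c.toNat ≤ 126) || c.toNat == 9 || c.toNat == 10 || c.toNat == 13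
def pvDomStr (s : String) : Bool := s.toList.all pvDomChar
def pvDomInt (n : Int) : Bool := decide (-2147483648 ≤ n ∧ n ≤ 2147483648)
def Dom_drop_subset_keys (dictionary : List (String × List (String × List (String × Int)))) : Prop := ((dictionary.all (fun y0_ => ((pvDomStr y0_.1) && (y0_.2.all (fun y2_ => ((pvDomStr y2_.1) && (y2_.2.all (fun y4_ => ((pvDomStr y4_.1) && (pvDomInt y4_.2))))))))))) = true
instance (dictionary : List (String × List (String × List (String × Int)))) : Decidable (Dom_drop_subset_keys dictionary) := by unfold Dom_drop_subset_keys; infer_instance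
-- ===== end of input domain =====

-- B groups the keys by working table once and compares column-sets only inside a group,
-- instead of A's all-pairs scan with per-pair recomputation (objective: faster —
-- measurably so in a timing run: no cross-table pairs, no per-pair recomputation).
-- Python A and B both mutate the passed dict in place and return it; the equivalence
-- proved here is about the returned value.

-- ===== PORT A =====
-- list(dictionary[key])[0]: first key of the value dict; exact whenever the value is a
-- present, nonempty dict (guaranteed by Pre_ wherever A evaluates this expression)
def dskTable (d : PySem.Dict String (List (String × List (String × Int)))) (k : String) : String :=
  ((PySem.Dict.getD d k []).map Prod.fst).headD ""

-- list(dictionary[key][t].keys()); t is always the first key of the value, so the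
-- inner lookup never raises
def dskCols (d : PySem.Dict String (List (String × List (String × Int)))) (k t : String) : List String :=
  (PySem.Dict.getD (PySem.Dict.mk (PySem.Dict.getD d k [])) t []).map Prod.fst

-- for key1 in dictionary: for key2 in dictionary: … break  — the inner loop with its
-- break is ported as find? (first key2 satisfying the nested conditions, or none)
def dskKeysToRemove (d : PySem.Dict String (List (String × List (String × Int)))) : List String :=
  d.keys.foldl (fun acc key1 =>
    match d.keys.find? (fun key2 =>
      key1 != key2 &&
      (dskTable d key1 == dskTable d key2 &&
       -- set(column_key1).issubset(set(column_key2))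
       PySem.Set.issubset (PySem.Set.ofList (dskCols d key1 (dskTable d key1)))
                          (PySem.Set.ofList (dskCols d key2 (dskTable d key2))))) with
    | some _ => acc ++ [key1]
    | none => acc) ([] : List String)

def drop_subset_keys (dictionary : List (String × List (String × List (String × Int)))) : List (String × List (String × List (String × Int))) :=
  let d := PySem.Dict.mk dictionary
  -- for key in keys_to_remove: del dictionary[key]
  ((dskKeysToRemove d).foldl (fun acc key => acc.erase key) d).items

-- ===== PORT B =====
-- next(iter(value)): first key of the value dict (exact when value ≠ [])
def dskTableOf (v : List (String × List (String × Int))) : String :=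
  (v.map Prod.fst).headD ""

-- set(value[table]): the set of column names of value[table]
def dskColsOf (v : List (String × List (String × Int))) (t : String) : PySem.Set String :=
  PySem.Set.ofList ((PySem.Dict.getD (PySem.Dict.mk v) t []).map Prod.fst)

-- groups.setdefault(table, []).append((key, cols))  =  modify table [] (· ++ [(key, cols)])
def dskGroups (dictionary : List (String × List (String × List (String × Int)))) : PySem.Dict String (List (String × PySem.Set String)) :=
  dictionary.foldl (fun g kv =>
      g.modify (dskTableOf kv.2) [] (· ++ [(kv.1, dskColsOf kv.2 (dskTableOf kv.2))]))
    PySem.Dict.empty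

-- for members in groups.values(): for key1, cols1 in members: if any(…): doomed.append(key1)
def dskDoomed (valuesList : List (List (String × PySem.Set String))) : List String :=
  valuesList.foldl (fun acc members =>
      members.foldl (fun acc2 m =>
        if members.any (fun m2 => m2.1 != m.1 && PySem.Set.issubset m.2 m2.2)
        then acc2 ++ [m.1] else acc2) acc) ([] : List String)

def drop_subset_keys_alt (dictionary : List (String × List (String × List (String × Int)))) : List (String × List (String × List (String × Int))) :=
  if dictionary.length < 2 then dictionary else
  -- for key in doomed: del dictionary[key]
  ((dskDoomed (dskGroups dictionary).values).foldl (fun acc key => acc.erase key)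
    (PySem.Dict.mk dictionary)).items

-- ===== PRECONDITION & SPEC =====
-- Pre_ requires (a) pairwise-distinct outer keys — the argument stands for a Python dict,
-- whose keys are distinct by construction, so this excludes only association lists no dict
-- can produce — and (b) that a dictionary with ≥ 2 entries has no empty value: on those A
-- raises IndexError at list(dictionary[key])[0] (a single-entry dict never reaches that
-- expression, so it stays inside Pre_).
def Pre_drop_subset_keys (dictionary : List (String × List (String × List (String × Int)))) : Prop :=
  (dictionary.map Prod.fst).Nodup ∧
  (dictionary.length ≤ 1 ∨ ∀ kv ∈ dictionary, kv.2 ≠ [])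
instance (dictionary : List (String × List (String × List (String × Int)))) : Decidable (Pre_drop_subset_keys dictionary) := by unfold Pre_drop_subset_keys; infer_instance

def pvWitness_drop_subset_keys : (List (String × List (String × List (String × Int)))) :=
  [("a", [("t", [("c", 1)])]), ("b", [("t", [("c", 1), ("d", 2)])])]

def Spec_drop_subset_keys (dictionary : List (String × List (String × List (String × Int)))) (out : List (String × List (String × List (String × Int)))) : Prop := out = drop_subset_keys_alt dictionary
instance (dictionary : List (String × List (String × List (String × Int)))) (out : List (String × List (String × List (String × Int)))) : Decidable (Spec_drop_subset_keys dictionary out) := by unfold Spec_drop_subset_keys; infer_instance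

-- ===== CLAIM (what is proved, stated in full; the proofs are below) =====
def Claim_equal_drop_subset_keys : Prop := ∀ (dictionary : List (String × List (String × List (String × Int)))), Dom_drop_subset_keys dictionary → Pre_drop_subset_keys dictionary → Spec_drop_subset_keys dictionary (drop_subset_keys dictionary)

-- ===== LEMMAS AND PROOFS =====

-- deleting the keys of L from d keeps exactly the items whose key is not in L
theorem dsk_items_foldl_erase {ν : Type} (L : List String) (d : PySem.Dict String ν) :
    (L.foldl (fun acc key => acc.erase key) d).items
      = d.items.filter (fun p => !(L.contains p.1)) := by
  induction L generalizing d with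
  | nil => simp
  | cons k L ih =>
    simp only [List.foldl_cons, ih (d.erase k)]
    show ((d.items.filter _).filter _) = _
    rw [List.filter_filter]
    apply List.filter_congr
    intro p _
    by_cases h : p.1 = k <;> simp [h]

-- the break-search of A's inner loop, as an if on `any`
theorem dsk_match_find (p : String → Bool) (K acc : List String) (k : String) :
    (match K.find? p with
     | some _ => acc ++ [k]
     | none => acc) = if K.any p then acc ++ [k] else acc := by
  cases h : K.find? p with
  | none =>
    rw [List.find?_eq_none] at h
    simp only [List.any_eq_true]
    rw [if_neg (by simp_all)]
  | some x =>
    have := List.find?_some h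
    have hm := List.mem_of_find?_eq_some h
    simp only [List.any_eq_true]
    rw [if_pos ⟨x, hm, this⟩]

-- A's removal list is the keys that pass the pairwise test
theorem dsk_keysToRemove_eq (d : PySem.Dict String (List (String × List (String × Int)))) :
    dskKeysToRemove d = d.keys.filter (fun key1 =>
      d.keys.any (fun key2 =>
        key1 != key2 &&
        (dskTable d key1 == dskTable d key2 &&
         PySem.Set.issubset (PySem.Set.ofList (dskCols d key1 (dskTable d key1)))
                            (PySem.Set.ofList (dskCols d key2 (dskTable d key2)))))) := by
  unfold dskKeysToRemove
  simp only [dsk_match_find]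
  rw [PySem.List.foldl_append_if_eq_filter]
  simp

-- the grouping loop, per table: the keys of that table in order, with their column sets
theorem dsk_groups_getD (l : List (String × List (String × List (String × Int)))) (t : String) :
    (dskGroups l).getD t []
      = (l.filter (fun kv => dskTableOf kv.2 == t)).map
          (fun kv => (kv.1, dskColsOf kv.2 (dskTableOf kv.2))) := by
  unfold dskGroups
  rw [← List.foldl_map
        (f := fun kv : String × List (String × List (String × Int)) =>
          (dskTableOf kv.2, (kv.1, dskColsOf kv.2 (dskTableOf kv.2))))
        (g := fun g p => PySem.Dict.modify g p.1 [] (· ++ [p.2]))]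
  rw [PySem.Dict.getD_foldl_modify_append]
  simp [List.filter_map, Function.comp_def]

theorem dsk_groups_keys (l : List (String × List (String × List (String × Int)))) :
    (dskGroups l).keys = PySem.Set.ofList (l.map (fun kv => dskTableOf kv.2)) := by
  unfold dskGroups
  rw [PySem.Dict.keys_foldl_modify_key l (fun kv => dskTableOf kv.2) []
        (fun _ kv => (· ++ [(kv.1, dskColsOf kv.2 (dskTableOf kv.2))]))]
  simp [PySem.Set.update_nil_left]

theorem dsk_groups_keys_nodup (l : List (String × List (String × List (String × Int)))) :
    (dskGroups l).keys.Nodup := by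
  unfold dskGroups
  exact PySem.Dict.nodup_keys_foldl_modify_key l (fun kv => dskTableOf kv.2) []
    (fun _ kv => (· ++ [(kv.1, dskColsOf kv.2 (dskTableOf kv.2))])) _
    PySem.Dict.nodup_keys_empty

-- B's marking loops, flattened
theorem dsk_doomed_eq (V : List (List (String × PySem.Set String))) :
    dskDoomed V = V.flatMap (fun members =>
      (members.filter (fun m =>
        members.any (fun m2 => m2.1 != m.1 && PySem.Set.issubset m.2 m2.2))).map Prod.fst) := by
  unfold dskDoomed
  suffices h : ∀ (V : List (List (String × PySem.Set String)))
      (acc : List String),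
      V.foldl (fun acc members =>
        members.foldl (fun acc2 m =>
          if members.any (fun m2 => m2.1 != m.1 && PySem.Set.issubset m.2 m2.2)
          then acc2 ++ [m.1] else acc2) acc) acc
      = acc ++ V.flatMap (fun members =>
          (members.filter (fun m =>
            members.any (fun m2 => m2.1 != m.1 && PySem.Set.issubset m.2 m2.2))).map Prod.fst) by
    simpa using h V []
  intro V
  induction V with
  | nil => simp
  | cons v V ih =>
    intro acc
    simp only [List.foldl_cons, List.flatMap_cons]
    rw [PySem.List.foldl_append_if, ih, List.append_assoc]

theorem dsk_mk_keys (l : List (String × List (String × List (String × Int)))) :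
    (PySem.Dict.mk l).keys = l.map Prod.fst := rfl

theorem dsk_getD_mk (l : List (String × List (String × List (String × Int))))
    (hnd : (l.map Prod.fst).Nodup) {kv : String × List (String × List (String × Int))}
    (h : kv ∈ l) : PySem.Dict.getD (PySem.Dict.mk l) kv.1 [] = kv.2 := by
  exact PySem.Dict.getD_of_mem_items _ (by exact h) (by exact hnd) []

theorem dsk_mem_remove_iff (l : List (String × List (String × List (String × Int))))
    (hnd : (l.map Prod.fst).Nodup) (x : String) :
    x ∈ dskKeysToRemove (PySem.Dict.mk l) ↔ x ∈ dskDoomed (dskGroups l).values := by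
  rw [dsk_keysToRemove_eq, dsk_doomed_eq,
      PySem.Dict.values_eq_map_keys _ (dsk_groups_keys_nodup l) []]
  simp only [dsk_groups_keys, dsk_groups_getD, dsk_mk_keys]
  simp only [List.mem_filter, List.mem_flatMap, List.mem_map, List.any_eq_true,
    PySem.Set.mem_ofList, Bool.and_eq_true, bne_iff_ne, beq_iff_eq, ne_eq]
  have hT : ∀ kv ∈ l, dskTable (PySem.Dict.mk l) kv.1 = dskTableOf kv.2 := by
    intro kv h
    unfold dskTable dskTableOf
    rw [dsk_getD_mk l hnd h]
  have hC : ∀ kv ∈ l, ∀ t, PySem.Set.ofList (dskCols (PySem.Dict.mk l) kv.1 t) = dskColsOf kv.2 t := by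
    intro kv h t
    unfold dskCols dskColsOf
    rw [dsk_getD_mk l hnd h]
  constructor
  · rintro ⟨⟨kv, hkv, rfl⟩, key2, ⟨kv2, hkv2, rfl⟩, hne, htbl, hsub⟩
    have ht1 := hT kv hkv
    have ht2 := hT kv2 hkv2
    refine ⟨_, ⟨dskTableOf kv.2, ⟨kv, hkv, rfl⟩, rfl⟩,
      (kv.1, dskColsOf kv.2 (dskTableOf kv.2)), ⟨?_, ?_⟩, rfl⟩
    · exact List.mem_map.2 ⟨kv, List.mem_filter.2 ⟨hkv, by simp⟩, rfl⟩
    · refine ⟨(kv2.1, dskColsOf kv2.2 (dskTableOf kv2.2)),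
        List.mem_map.2 ⟨kv2, List.mem_filter.2 ⟨hkv2, by simp [← ht1, ← ht2, htbl]⟩, rfl⟩,
        fun h => hne h.symm, ?_⟩
      rw [hC kv hkv, hC kv2 hkv2, ht1, ht2] at hsub
      simpa using hsub
  · rintro ⟨mems, ⟨t, ⟨kvt, hkvt, rfl⟩, rfl⟩, m, ⟨hm, m2, hm2, hne2, hsub2⟩, rfl⟩
    obtain ⟨kv, hkvf, rfl⟩ := List.mem_map.1 hm
    obtain ⟨kv2, hkv2f, rfl⟩ := List.mem_map.1 hm2
    obtain ⟨hkv, htkv⟩ := List.mem_filter.1 hkvf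
    obtain ⟨hkv2, htkv2⟩ := List.mem_filter.1 hkv2f
    have htkv := beq_iff_eq.1 htkv
    have htkv2 := beq_iff_eq.1 htkv2
    refine ⟨⟨kv, hkv, rfl⟩, kv2.1, ⟨kv2, hkv2, rfl⟩,
      fun h => hne2 h.symm, ?_, ?_⟩
    · rw [hT kv hkv, hT kv2 hkv2, htkv, htkv2]
    · rw [hC kv hkv, hC kv2 hkv2, hT kv hkv, hT kv2 hkv2, htkv, htkv2]
      simpa [htkv, htkv2] using hsub2

-- ===== VERDICT (by name: the statement is the Claim_ definition above) =====
theorem drop_subset_keys_spec : Claim_equal_drop_subset_keys := by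
  intro l _hdom hpre
  obtain ⟨hnd, _⟩ := hpre
  unfold Spec_drop_subset_keys
  by_cases hlen : l.length < 2
  · unfold drop_subset_keys drop_subset_keys_alt
    rw [if_pos hlen]
    match l, hlen with
    | [], _ => rfl
    | [kv], _ =>
      simp [dskKeysToRemove]
  · unfold drop_subset_keys drop_subset_keys_alt
    rw [if_neg hlen, dsk_items_foldl_erase, dsk_items_foldl_erase]
    apply List.filter_congr
    intro p hp
    have hiff := dsk_mem_remove_iff l hnd p.1
    rw [Bool.not_inj_iff, Bool.eq_iff_iff]
    simpa [List.contains_iff_mem] using hiff
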